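-- pv_equiv track=rewrite | github.com/jackalwonder/smart_home_core | backend/app/services/floor_plan_analysis_service.py | _detect_plan_bounds
-- ===== SOURCE A (Python) =====
-- def _detect_plan_bounds(mask: list[bool], width: int, height: int) -> dict[str, int] | None:
--     xs: list[int] = []
--     ys: list[int] = []
--     for index, is_wall in enumerate(mask):
--         if not is_wall:
--             continue
--         y, x = divmod(index, width)
--         xs.append(x)
--         ys.append(y)
--
--     if not xs or not ys:
--         return None
--
--     min_x = max(min(xs) - 2, 0)
--     max_x = min(max(xs) + 2, width - 1)
--     min_y = max(min(ys) - 2, 0)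
--     max_y = min(max(ys) + 2, height - 1)
--     return {
--         "x": min_x,
--         "y": min_y,
--         "width": max(max_x - min_x + 1, 1),
--         "height": max(max_y - min_y + 1, 1),
--     }
-- ===== SOURCE B (Python) =====
-- def _detect_plan_bounds(mask: list[bool], width: int, height: int):
--     bounds = None
--     for index, is_wall in enumerate(mask):
--         if is_wall:
--             y, x = divmod(index, width)
--             if bounds is None:
--                 bounds = (x, x, y, y)
--             else:
--                 mnx, mxx, mny, mxy = bounds
--                 bounds = (min(mnx, x), max(mxx, x), min(mny, y), max(mxy, y))
--     if bounds is None: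
--         return None
--     mnx, mxx, mny, mxy = bounds
--     min_x = max(mnx - 2, 0)
--     max_x = min(mxx + 2, width - 1)
--     min_y = max(mny - 2, 0)
--     max_y = min(mxy + 2, height - 1)
--     return {
--         "x": min_x,
--         "y": min_y,
--         "width": max(max_x - min_x + 1, 1),
--         "height": max(max_y - min_y + 1, 1),
--     }
-- ===== Notes on version B (the rewrite author's own statement) =====
-- stated objective: simpler
-- what changed: Replaces A's two coordinate-list builds plus four separate min()/max() reductions with a single pass keeping a running (min_x,max_x,min_y,max_y) accumulator, so no intermediate lists are built.
import Mathlib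
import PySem

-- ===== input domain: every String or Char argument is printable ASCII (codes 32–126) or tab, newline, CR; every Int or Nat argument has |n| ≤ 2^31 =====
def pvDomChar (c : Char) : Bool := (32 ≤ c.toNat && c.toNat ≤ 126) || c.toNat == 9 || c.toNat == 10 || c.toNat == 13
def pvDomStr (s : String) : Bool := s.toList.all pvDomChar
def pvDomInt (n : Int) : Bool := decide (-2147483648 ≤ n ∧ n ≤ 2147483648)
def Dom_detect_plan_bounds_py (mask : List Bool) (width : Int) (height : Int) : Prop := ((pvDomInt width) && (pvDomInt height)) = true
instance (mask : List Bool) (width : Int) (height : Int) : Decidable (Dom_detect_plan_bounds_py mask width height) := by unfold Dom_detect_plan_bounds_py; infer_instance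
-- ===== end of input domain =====

-- B replaces A's two coordinate-list builds + four separate min/max reductions by one
-- running-extrema accumulator pass (objective: simpler, O(1) extra space).


-- ===== PORT A =====
-- Literal port of A: build xs/ys lists of wall coordinates, then four min/max reductions.
def detect_plan_bounds_py (mask : List Bool) (width : Int) (height : Int) : Option (List (String × Int)) :=
  let p := (PySem.List.enumerate mask).foldl
    (fun (p : List Int × List Int) (iw : Int × Bool) =>
      if !iw.2 then p
      else (p.1 ++ [PySem.Int.mod iw.1 width], p.2 ++ [PySem.Int.floordiv iw.1 width]))
    ([], [])
  let xs := p.1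
  let ys := p.2
  if xs = [] ∨ ys = [] then none
  else
    match PySem.List.min? xs (fun v => v), PySem.List.max? xs (fun v => v),
          PySem.List.min? ys (fun v => v), PySem.List.max? ys (fun v => v) with
    | some mnx, some mxx, some mny, some mxy =>
        let min_x := max (mnx - 2) 0
        let max_x := min (mxx + 2) (width - 1)
        let min_y := max (mny - 2) 0
        let max_y := min (mxy + 2) (height - 1)
        some [("x", min_x), ("y", min_y),
              ("width", max (max_x - min_x + 1) 1),
              ("height", max (max_y - min_y + 1) 1)]
    | _, _, _, _ => none    -- unreachable: min?/max? of a nonempty list are some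

-- ===== PORT B =====
-- Literal port of B: single pass, Option running extrema (mnx, mxx, mny, mxy).
def detect_plan_bounds_py_alt (mask : List Bool) (width : Int) (height : Int) : Option (List (String × Int)) :=
  let bounds := (PySem.List.enumerate mask).foldl
    (fun (st : Option (Int × Int × Int × Int)) (iw : Int × Bool) =>
      if iw.2 then
        let y := PySem.Int.floordiv iw.1 width
        let x := PySem.Int.mod iw.1 width
        match st with
        | none => some (x, x, y, y)
        | some (mnx, mxx, mny, mxy) => some (min mnx x, max mxx x, min mny y, max mxy y)
      else st)
    none
  match bounds with
  | none => none
  | some (mnx, mxx, mny, mxy) =>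
      let min_x := max (mnx - 2) 0
      let max_x := min (mxx + 2) (width - 1)
      let min_y := max (mny - 2) 0
      let max_y := min (mxy + 2) (height - 1)
      some [("x", min_x), ("y", min_y),
            ("width", max (max_x - min_x + 1) 1),
            ("height", max (max_y - min_y + 1) 1)]

-- ===== PRECONDITION & SPEC =====
-- Pre_ excludes width = 0 when the mask contains a wall: there Python's divmod raises ZeroDivisionError (in both A and B).
def Pre_detect_plan_bounds_py (mask : List Bool) (width : Int) (height : Int) : Prop :=
  true ∈ mask → width ≠ 0
instance (mask : List Bool) (width : Int) (height : Int) : Decidable (Pre_detect_plan_bounds_py mask width height) := by unfold Pre_detect_plan_bounds_py; infer_instance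
def pvWitness_detect_plan_bounds_py : List Bool × Int × Int := ([true, false, true, true, false], 2, 3)

def Spec_detect_plan_bounds_py (mask : List Bool) (width : Int) (height : Int) (out : Option (List (String × Int))) : Prop := out = detect_plan_bounds_py_alt mask width height
instance (mask : List Bool) (width : Int) (height : Int) (out : Option (List (String × Int))) : Decidable (Spec_detect_plan_bounds_py mask width height out) := by unfold Spec_detect_plan_bounds_py; infer_instance

-- ===== CLAIM (what is proved, stated in full; the proofs are below) =====
def Claim_equal_detect_plan_bounds_py : Prop := ∀ (mask : List Bool) (width : Int) (height : Int), Dom_detect_plan_bounds_py mask width height → Pre_detect_plan_bounds_py mask width height → Spec_detect_plan_bounds_py mask width height (detect_plan_bounds_py mask width height)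

-- ===== LEMMAS AND PROOFS =====

-- the wall indices of an enumerated list
def pvWix (l : List (Int × Bool)) : List Int := (l.filter (·.2)).map (·.1)

-- A's fold builds exactly the x/y coordinate lists of the wall indices.
theorem pvFoldA_eq (w : Int) (l : List (Int × Bool)) (xs ys : List Int) :
    l.foldl (fun (p : List Int × List Int) (iw : Int × Bool) =>
      if !iw.2 then p
      else (p.1 ++ [PySem.Int.mod iw.1 w], p.2 ++ [PySem.Int.floordiv iw.1 w])) (xs, ys)
    = (xs ++ (pvWix l).map (fun k => PySem.Int.mod k w),
       ys ++ (pvWix l).map (fun k => PySem.Int.floordiv k w)) := by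
  induction l generalizing xs ys with
  | nil => simp [pvWix]
  | cons hd tl ih =>
      by_cases hb : hd.2 = true
      · simp [pvWix, hb, List.foldl_cons, ih, List.filter_cons] at *
        simp [ih]
      · simp [pvWix, hb, List.foldl_cons, ih, List.filter_cons] at *
        simp [ih, pvWix]

-- componentwise step of B's accumulator
def pvStep4 (w : Int) (t : Int × Int × Int × Int) (k : Int) : Int × Int × Int × Int :=
  (min t.1 (PySem.Int.mod k w), max t.2.1 (PySem.Int.mod k w),
   min t.2.2.1 (PySem.Int.floordiv k w), max t.2.2.2 (PySem.Int.floordiv k w))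

-- B's fold from a some-state is the step4 fold over the wall indices.
theorem pvFoldB_some (w : Int) (l : List (Int × Bool)) (t : Int × Int × Int × Int) :
    l.foldl (fun (st : Option (Int × Int × Int × Int)) (iw : Int × Bool) =>
      if iw.2 then
        let y := PySem.Int.floordiv iw.1 w
        let x := PySem.Int.mod iw.1 w
        match st with
        | none => some (x, x, y, y)
        | some (mnx, mxx, mny, mxy) => some (min mnx x, max mxx x, min mny y, max mxy y)
      else st) (some t)
    = some ((pvWix l).foldl (pvStep4 w) t) := by
  induction l generalizing t with
  | nil => simp [pvWix]
  | cons hd tl ih =>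
      by_cases hb : hd.2 = true
      · obtain ⟨a, b, c, d⟩ := t
        simp [pvWix, hb, List.foldl_cons, ih, pvStep4]
      · simp [pvWix, hb, List.foldl_cons, ih]

-- B's fold from none: none iff no wall; otherwise seeded by the first wall.
theorem pvFoldB_none (w : Int) (l : List (Int × Bool)) :
    l.foldl (fun (st : Option (Int × Int × Int × Int)) (iw : Int × Bool) =>
      if iw.2 then
        let y := PySem.Int.floordiv iw.1 w
        let x := PySem.Int.mod iw.1 w
        match st with
        | none => some (x, x, y, y)
        | some (mnx, mxx, mny, mxy) => some (min mnx x, max mxx x, min mny y, max mxy y)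
      else st) none
    = match pvWix l with
      | [] => none
      | k :: ks => some (ks.foldl (pvStep4 w)
          (PySem.Int.mod k w, PySem.Int.mod k w, PySem.Int.floordiv k w, PySem.Int.floordiv k w)) := by
  induction l with
  | nil => simp [pvWix]
  | cons hd tl ih =>
      by_cases hb : hd.2 = true
      · simp [pvWix, hb, List.foldl_cons, pvFoldB_some]
      · simp [pvWix, hb, List.foldl_cons, ih]

-- the 4-tuple fold splits into four independent min/max folds
theorem pvStep4_split (w : Int) (ks : List Int) (a b c d : Int) :
    ks.foldl (pvStep4 w) (a, b, c, d)
    = ((ks.map (fun k => PySem.Int.mod k w)).foldl min a,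
       (ks.map (fun k => PySem.Int.mod k w)).foldl max b,
       (ks.map (fun k => PySem.Int.floordiv k w)).foldl min c,
       (ks.map (fun k => PySem.Int.floordiv k w)).foldl max d) := by
  induction ks generalizing a b c d with
  | nil => rfl
  | cons k kt ih => simp [List.foldl_cons, pvStep4, ih]

-- ===== VERDICT (by name: the statement is the Claim_ definition above) =====
theorem detect_plan_bounds_py_spec : Claim_equal_detect_plan_bounds_py := by
  intro mask width height _ _
  unfold Spec_detect_plan_bounds_py detect_plan_bounds_py detect_plan_bounds_py_alt
  rw [pvFoldA_eq, pvFoldB_none]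
  cases hks : pvWix (PySem.List.enumerate mask) with
  | nil => simp
  | cons k ks =>
      simp only [List.map_cons, List.nil_append]
      rw [pvStep4_split]
      simp [PySem.List.min?_id_cons, PySem.List.max?_id_cons]
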